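-- pv_equiv track=rewrite | github.com/d-krupke/cpsat-primer | build.py | replace_tip_boxes
-- ===== SOURCE A (Python) =====
-- def _create_tip_box(msg):
--     return f"""
-- <table style="width: 100%; border: 2px solid #ccc; border-radius: 8px; box-shadow: 0 2px 4px rgba(0, 0, 0, 0.1);">
-- <tr>
-- <td style="padding: 10px;">
-- <div style="display: flex; justify-content: space-between; align-items: center;">
--   <div style="width: 10%;">
--     <img src="https://raw.githubusercontent.com/d-krupke/cpsat-primer/main/images/idea_platypus.webp" alt="Description of image" style="width: 100%;">
--   </div>
--   <div style="width: 90%;">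
--
-- {msg}
--
--   </div>
-- </div>
--     </td>
--   </tr>
-- </table>
--     """
--
-- def replace_tip_boxes(content):
--     """
--     A tip box starts with `> [!TIP]` and ends with a line that does not start with `>`.
--     """
--     lines = content.split("\n")
--     new_content = ""
--     collect_tip = False
--     tip_msg = ""
--     for line in lines:
--         if line.startswith("> [!TIP]"):
--             collect_tip = True
--             tip_msg += line[len("> [!TIP]") :] + "\n"
--         elif collect_tip:
--             if line == ">":
--                 continue
--             if line.startswith("> "):
--                 tip_msg += line[len("> ") :] + "\n"
--
--             else:
--                 new_content += _create_tip_box(tip_msg)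
--                 new_content += "\n"
--                 collect_tip = False
--                 tip_msg = ""
--                 new_content += line + "\n"
--         else:
--             new_content += line + "\n"
--     return new_content
-- ===== SOURCE B (Python) =====
-- def _create_tip_box(msg):
--     return f"""
-- <table style="width: 100%; border: 2px solid #ccc; border-radius: 8px; box-shadow: 0 2px 4px rgba(0, 0, 0, 0.1);">
-- <tr>
-- <td style="padding: 10px;">
-- <div style="display: flex; justify-content: space-between; align-items: center;">
--   <div style="width: 10%;">
--     <img src="https://raw.githubusercontent.com/d-krupke/cpsat-primer/main/images/idea_platypus.webp" alt="Description of image" style="width: 100%;">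
--   </div>
--   <div style="width: 90%;">
--
-- {msg}
--
--   </div>
-- </div>
--     </td>
--   </tr>
-- </table>
--     """
--
--
-- def _consume_tip(lines, i, tip):
--     """Consume the remainder of a tip block starting at index i.
--
--     Returns (emitted_text, next_index).  If the block runs to end-of-input
--     without a terminating line, nothing is emitted.
--     """
--     n = len(lines)
--     while i < n:
--         line = lines[i]
--         i += 1
--         if line.startswith("> [!TIP]"):
--             tip += line[8:] + "\n"
--         elif line == ">":
--             pass
--         elif line.startswith("> "):
--             tip += line[2:] + "\n"
--         else:
--             return _create_tip_box(tip) + "\n" + line + "\n", i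
--     return "", i
--
--
-- def replace_tip_boxes(content):
--     lines = content.split("\n")
--     out = []
--     i = 0
--     while i < len(lines):
--         line = lines[i]
--         i += 1
--         if line.startswith("> [!TIP]"):
--             block, i = _consume_tip(lines, i, line[8:] + "\n")
--             out.append(block)
--         else:
--             out.append(line + "\n")
--     return "".join(out)
-- ===== Notes on version B (the rewrite author's own statement) =====
-- stated objective: alternative
-- what changed: Replaces A's single flag-based state machine (collect_tip/tip_msg threaded through one loop with string +=) by an index-driven outer loop plus a separate helper that consumes one whole tip block, collecting emitted pieces in a list joined once at the end.
import Mathlib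
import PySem

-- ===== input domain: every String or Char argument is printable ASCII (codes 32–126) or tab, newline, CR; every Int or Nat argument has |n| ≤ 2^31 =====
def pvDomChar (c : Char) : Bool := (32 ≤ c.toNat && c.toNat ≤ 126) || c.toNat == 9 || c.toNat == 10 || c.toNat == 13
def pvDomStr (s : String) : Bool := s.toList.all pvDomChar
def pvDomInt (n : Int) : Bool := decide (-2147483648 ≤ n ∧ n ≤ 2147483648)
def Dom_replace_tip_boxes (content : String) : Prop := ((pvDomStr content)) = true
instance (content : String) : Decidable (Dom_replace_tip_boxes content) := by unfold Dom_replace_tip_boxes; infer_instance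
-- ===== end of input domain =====

-- B replaces A's flag-based state machine (collect_tip/tip_msg threaded through one loop) by an
-- outer per-line loop plus a separate helper that consumes one whole tip block; objective: alternative decomposition.

-- ===== PORT A =====
def tipPre : String := "\n<table style=\"width: 100%; border: 2px solid #ccc; border-radius: 8px; box-shadow: 0 2px 4px rgba(0, 0, 0, 0.1);\">\n<tr>\n<td style=\"padding: 10px;\">\n<div style=\"display: flex; justify-content: space-between; align-items: center;\">\n  <div style=\"width: 10%;\">\n    <img src=\"https://raw.githubusercontent.com/d-krupke/cpsat-primer/main/images/idea_platypus.webp\" alt=\"Description of image\" style=\"width: 100%;\">\n  </div>\n  <div style=\"width: 90%;\">\n\n"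

def tipSuf : String := "\n\n  </div>\n</div>\n    </td>\n  </tr>\n</table>\n    "

-- _create_tip_box(msg): the f-string template around msg
def tipBox (msg : String) : String := tipPre ++ msg ++ tipSuf

-- one iteration of A's for-loop over (new_content, collect_tip, tip_msg)
def repStep (st : String × Bool × String) (line : String) : String × Bool × String :=
  if PySem.Str.startswith line "> [!TIP]" then
    (st.1, true, st.2.2 ++ PySem.Str.slice line (some 8) none ++ "\n")
  else if st.2.1 then
    if line == ">" then st
    else if PySem.Str.startswith line "> " then
      (st.1, true, st.2.2 ++ PySem.Str.slice line (some 2) none ++ "\n")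
    else
      (st.1 ++ tipBox st.2.2 ++ "\n" ++ line ++ "\n", false, "")
  else
    (st.1 ++ line ++ "\n", false, "")

def replace_tip_boxes (content : String) : String :=
  (((PySem.Str.split? content "\n").getD []).foldl repStep ("", false, "")).1

-- ===== PORT B =====
-- _consume_tip: consume the rest of a tip block, return (emitted text, remaining lines)
def altConsume (tip : String) : List String → String × List String
  | [] => ("", [])
  | line :: rest =>
    if PySem.Str.startswith line "> [!TIP]" then
      altConsume (tip ++ PySem.Str.slice line (some 8) none ++ "\n") rest
    else if line == ">" then
      altConsume tip rest
    else if PySem.Str.startswith line "> " then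
      altConsume (tip ++ PySem.Str.slice line (some 2) none ++ "\n") rest
    else
      (tipBox tip ++ "\n" ++ line ++ "\n", rest)

-- remaining lines never grow (used for termination of altGo)
theorem altConsume_len (tip : String) (l : List String) :
    (altConsume tip l).2.length ≤ l.length := by
  induction l generalizing tip with
  | nil => simp [altConsume]
  | cons line rest ih =>
    simp only [altConsume]
    split_ifs with h1 h2 h3
    · exact le_trans (ih _) (by simp)
    · exact le_trans (ih _) (by simp)
    · exact le_trans (ih _) (by simp)
    · simp

-- B's outer while-loop: the list of emitted pieces
def altGo : List String → List String
  | [] => []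
  | line :: rest =>
    if PySem.Str.startswith line "> [!TIP]" then
      let p := altConsume (PySem.Str.slice line (some 8) none ++ "\n") rest
      p.1 :: altGo p.2
    else
      (line ++ "\n") :: altGo rest
termination_by l => l.length
decreasing_by
  · have := altConsume_len (PySem.Str.slice line (some 8) none ++ "\n") rest
    simp only [List.length_cons]; omega
  · simp

def replace_tip_boxes_alt (content : String) : String :=
  PySem.Str.join "" (altGo ((PySem.Str.split? content "\n").getD []))

-- ===== PRECONDITION & SPEC =====
def Spec_replace_tip_boxes (content : String) (out : String) : Prop := out = replace_tip_boxes_alt content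
instance (content : String) (out : String) : Decidable (Spec_replace_tip_boxes content out) := by unfold Spec_replace_tip_boxes; infer_instance

-- ===== CLAIM (what is proved, stated in full; the proofs are below) =====
def Claim_equal_replace_tip_boxes : Prop := ∀ (content : String), Dom_replace_tip_boxes content → Spec_replace_tip_boxes content (replace_tip_boxes content)

-- ===== LEMMAS AND PROOFS =====
theorem join_empty_cons (a : String) (l : List String) :
    PySem.Str.join "" (a :: l) = a ++ PySem.Str.join "" l := by
  apply String.toList_injective
  simp [PySem.Str.join, PySem.Chars.join]
  cases l <;> simp [List.intercalate]

theorem join_empty_nil : PySem.Str.join "" ([] : List String) = "" := by decide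

-- the core invariant: A's fold, from either state, produces B's pieces
theorem fold_eq (lines : List String) :
    (∀ acc : String, (lines.foldl repStep (acc, false, "")).1 = acc ++ PySem.Str.join "" (altGo lines)) ∧
    (∀ acc tip : String, (lines.foldl repStep (acc, true, tip)).1 =
        acc ++ (altConsume tip lines).1 ++ PySem.Str.join "" (altGo (altConsume tip lines).2)) := by
  induction lines with
  | nil =>
    constructor
    · intro acc; simp [altGo, join_empty_nil, String.append_empty]
    · intro acc tip
      simp [altConsume, altGo, join_empty_nil, String.append_empty]
  | cons line rest ih =>
    obtain ⟨ihF, ihT⟩ := ih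
    constructor
    · intro acc
      by_cases h1 : PySem.Str.startswith line "> [!TIP]" = true
      · have hs : repStep (acc, false, "") line
            = (acc, true, "" ++ PySem.Str.slice line (some 8) none ++ "\n") := by
          simp only [repStep]; rw [if_pos h1]
        have hg : altGo (line :: rest)
            = (altConsume (PySem.Str.slice line (some 8) none ++ "\n") rest).1
              :: altGo (altConsume (PySem.Str.slice line (some 8) none ++ "\n") rest).2 := by
          rw [altGo]; rw [if_pos h1]
        rw [List.foldl_cons, hs, ihT, hg, join_empty_cons]
        simp [String.append_assoc, String.empty_append]
      · have hs : repStep (acc, false, "") line = (acc ++ line ++ "\n", false, "") := by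
          simp only [repStep]; rw [if_neg h1]; simp
        have hg : altGo (line :: rest) = (line ++ "\n") :: altGo rest := by
          rw [altGo]; rw [if_neg h1]
        rw [List.foldl_cons, hs, ihF, hg, join_empty_cons]
        simp [String.append_assoc]
    · intro acc tip
      by_cases h1 : PySem.Str.startswith line "> [!TIP]" = true
      · have hs : repStep (acc, true, tip) line
            = (acc, true, tip ++ PySem.Str.slice line (some 8) none ++ "\n") := by
          simp only [repStep]; rw [if_pos h1]
        have hc : altConsume tip (line :: rest)
            = altConsume (tip ++ PySem.Str.slice line (some 8) none ++ "\n") rest := by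
          rw [altConsume]; rw [if_pos h1]
        rw [List.foldl_cons, hs, ihT, hc]
      · by_cases h2 : (line == ">") = true
        · have hs : repStep (acc, true, tip) line = (acc, true, tip) := by
            simp only [repStep]; rw [if_neg h1, if_pos trivial, if_pos h2]
          have hc : altConsume tip (line :: rest) = altConsume tip rest := by
            rw [altConsume]; rw [if_neg h1, if_pos h2]
          rw [List.foldl_cons, hs, ihT, hc]
        · by_cases h3 : PySem.Str.startswith line "> " = true
          · have hs : repStep (acc, true, tip) line
                = (acc, true, tip ++ PySem.Str.slice line (some 2) none ++ "\n") := by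
              simp only [repStep]; rw [if_neg h1, if_pos trivial, if_neg h2, if_pos h3]
            have hc : altConsume tip (line :: rest)
                = altConsume (tip ++ PySem.Str.slice line (some 2) none ++ "\n") rest := by
              rw [altConsume]; rw [if_neg h1, if_neg h2, if_pos h3]
            rw [List.foldl_cons, hs, ihT, hc]
          · have hs : repStep (acc, true, tip) line
                = (acc ++ tipBox tip ++ "\n" ++ line ++ "\n", false, "") := by
              simp only [repStep]; rw [if_neg h1, if_pos trivial, if_neg h2, if_neg h3]
            have hc : altConsume tip (line :: rest)
                = (tipBox tip ++ "\n" ++ line ++ "\n", rest) := by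
              rw [altConsume]; rw [if_neg h1, if_neg h2, if_neg h3]
            rw [List.foldl_cons, hs, ihF, hc]
            simp [String.append_assoc]

-- ===== VERDICT (by name: the statement is the Claim_ definition above) =====
theorem replace_tip_boxes_spec : Claim_equal_replace_tip_boxes := by
  intro content _
  unfold Spec_replace_tip_boxes replace_tip_boxes replace_tip_boxes_alt
  rw [(fold_eq _).1 ""]
  simp [String.empty_append]
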